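-- pv_equiv track=rewrite | github.com/aran-tia/python-start | day29_problem1.py | get_multiple_letters
-- ===== SOURCE A (Python) =====
-- def get_multiple_letters(text):
--     count = {}
--
--     for n in text:
--         if n in count:
--             count[n] += 1
--         else:
--             count[n] = 1
--     result = []
--
--     for k, v in count.items():
--         if v >= 2:
--             result.append(k)
--
--     return result
-- ===== SOURCE B (Python) =====
-- def get_multiple_letters(text):
--     s = sorted(text)
--     dups = {a for a, b in zip(s, s[1:]) if a == b}
--     seen = set()
--     result = []
--     for c in text:
--         if c not in seen:
--             seen.add(c)
--             if c in dups:
--                 result.append(c)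
--     return result
-- ===== Notes on version B (the rewrite author's own statement) =====
-- stated objective: alternative
-- what changed: B finds the duplicated characters by sorting the text and scanning adjacent pairs for equal neighbours (a sort-based duplicate detector), then emits them in first-occurrence order with a single seen-set pass, instead of A's frequency dictionary filtered by count.
import Mathlib
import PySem

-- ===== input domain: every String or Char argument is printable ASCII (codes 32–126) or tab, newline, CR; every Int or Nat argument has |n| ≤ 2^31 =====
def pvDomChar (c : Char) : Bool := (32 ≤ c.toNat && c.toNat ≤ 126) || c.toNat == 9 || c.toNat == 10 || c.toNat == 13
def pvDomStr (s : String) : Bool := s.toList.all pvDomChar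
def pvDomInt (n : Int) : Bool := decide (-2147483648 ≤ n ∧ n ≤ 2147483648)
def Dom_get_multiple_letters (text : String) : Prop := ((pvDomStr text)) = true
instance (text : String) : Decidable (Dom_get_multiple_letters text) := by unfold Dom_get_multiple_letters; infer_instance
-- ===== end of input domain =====

-- B detects duplicated characters by sorting and comparing adjacent neighbours, then emits them in first-occurrence order in one seen-set pass (alternative algorithm; same results).


-- ===== PORT A =====
def get_multiple_letters (text : String) : List String :=
  let count : PySem.Dict Char Int :=
    text.toList.foldl
      (fun d n => if d.contains n then d.insert n (d.getD n 0 + 1) else d.insert n 1)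
      PySem.Dict.empty
  count.items.foldl (fun r kv => if kv.2 ≥ 2 then r ++ [String.ofList [kv.1]] else r) []

-- ===== PORT B =====
def get_multiple_letters_alt (text : String) : List String :=
  let s := PySem.List.sorted text.toList (fun x => x) false
  let dups : PySem.Set Char :=
    PySem.Set.ofList
      (((s.zip (PySem.List.slice s (some 1) none)).filter (fun p => p.1 == p.2)).map Prod.fst)
  let final := text.toList.foldl
    (fun (st : PySem.Set Char × List String) c =>
      if PySem.Set.contains st.1 c then st
      else
        let seen := PySem.Set.add st.1 c
        if PySem.Set.contains dups c then (seen, st.2 ++ [String.ofList [c]])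
        else (seen, st.2))
    (PySem.Set.empty, [])
  final.2

-- ===== PRECONDITION & SPEC =====
def Spec_get_multiple_letters (text : String) (out : List String) : Prop := out = get_multiple_letters_alt text
instance (text : String) (out : List String) : Decidable (Spec_get_multiple_letters text out) := by unfold Spec_get_multiple_letters; infer_instance

-- ===== CLAIM (what is proved, stated in full; the proofs are below) =====
def Claim_equal_get_multiple_letters : Prop := ∀ (text : String), Dom_get_multiple_letters text → Spec_get_multiple_letters text (get_multiple_letters text)

-- ===== LEMMAS AND PROOFS =====

-- A's if-branching counting step is exactly the unconditional insert-with-getD step.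
theorem pv_step_eq (d : PySem.Dict Char Int) (n : Char) :
    (if d.contains n then d.insert n (d.getD n 0 + 1) else d.insert n 1)
      = d.insert n (d.getD n 0 + 1) := by
  by_cases h : d.contains n = true
  · simp [h]
  · have h' : d.contains n = false := by simpa using h
    rw [PySem.Dict.contains_eq_isSome_get?] at h'
    simp [Option.isSome_eq_false_iff] at h'
    simp [h, PySem.Dict.getD, h']

-- A's counting loop is PySem's counter.
theorem pv_fold_eq (xs : List Char) (d : PySem.Dict Char Int) :
    xs.foldl (fun d n => if d.contains n then d.insert n (d.getD n 0 + 1) else d.insert n 1) d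
      = xs.foldl (fun d x => d.insert x (d.getD x 0 + 1)) d := by
  induction xs generalizing d with
  | nil => rfl
  | cons x xs ih => rw [List.foldl_cons, pv_step_eq]; exact ih _

-- A's value in closed form: first-occurrence-deduped characters with count ≥ 2.
theorem pv_A_closed (text : String) :
    get_multiple_letters text
      = ((PySem.List.dedup text.toList).filter
           (fun c => decide (2 ≤ text.toList.count c))).map (fun c => String.ofList [c]) := by
  unfold get_multiple_letters
  rw [pv_fold_eq, PySem.Dict.foldl_insert_getD_add_one_eq_counter,
      PySem.List.foldl_append_ite (fun kv : Char × Int => kv.2 ≥ 2)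
        (fun kv => String.ofList [kv.1]),
      PySem.Dict.items_counter, List.filter_map, List.map_map]
  simp only [List.nil_append, Function.comp_def, PySem.List.dedup_eq_ofList]
  congr 1
  apply List.filter_congr
  intro c _
  simp

-- The leftover of first-occurrence dedup relative to an already-seen set (proofs only).
def pvDedupFrom (seen : PySem.Set Char) : List Char → List Char
  | [] => []
  | x :: xs =>
      if PySem.Set.contains seen x then pvDedupFrom seen xs
      else x :: pvDedupFrom (PySem.Set.add seen x) xs

theorem pv_dedupFrom_foldl (xs : List Char) : ∀ seen : PySem.Set Char,
    xs.foldl PySem.Set.add seen = seen ++ pvDedupFrom seen xs := by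
  induction xs with
  | nil => intro seen; simp [pvDedupFrom]
  | cons x xs ih =>
    intro seen
    by_cases hm : x ∈ seen
    · have hx : PySem.Set.add seen x = seen := by simp [PySem.Set.add, PySem.Set.contains, hm]
      simp [pvDedupFrom, PySem.Set.contains, hm, ih]
    · have hx : PySem.Set.add seen x = seen ++ [x] := by simp [PySem.Set.add, PySem.Set.contains, hm]
      have hc : PySem.Set.contains seen x = false := by simp [PySem.Set.contains, hm]
      simp only [pvDedupFrom, hc, Bool.false_eq_true, if_false, List.foldl_cons, hx,
        ih (seen ++ [x])]
      simp

theorem pv_dedupFrom_empty (xs : List Char) :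
    pvDedupFrom PySem.Set.empty xs = PySem.List.dedup xs := by
  have h := pv_dedupFrom_foldl xs ([] : PySem.Set Char)
  simp only [List.nil_append] at h
  rw [PySem.List.dedup_eq_ofList, PySem.Set.ofList_eq_foldl]
  exact h.symm

-- B's emit loop in closed form.
theorem pv_loop_closed (dups : PySem.Set Char) (xs : List Char) :
    ∀ (seen : PySem.Set Char) (res : List String),
    (xs.foldl
      (fun (st : PySem.Set Char × List String) c =>
        if PySem.Set.contains st.1 c then st
        else
          let seen := PySem.Set.add st.1 c
          if PySem.Set.contains dups c then (seen, st.2 ++ [String.ofList [c]])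
          else (seen, st.2))
      (seen, res)).2
    = res ++ ((pvDedupFrom seen xs).filter
        (fun c => PySem.Set.contains dups c)).map (fun c => String.ofList [c]) := by
  induction xs with
  | nil => intro seen res; simp [pvDedupFrom]
  | cons x xs ih =>
    intro seen res
    rw [List.foldl_cons]
    by_cases hm : x ∈ seen
    · have hc : PySem.Set.contains seen x = true := by simp [PySem.Set.contains, hm]
      simp only [hc, reduceIte]
      rw [ih]
      simp only [pvDedupFrom, hc, reduceIte]
    · have hc : PySem.Set.contains seen x = false := by simp [PySem.Set.contains, hm]
      by_cases hd : PySem.Set.contains dups x = true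
      · simp only [hc, hd, Bool.false_eq_true, reduceIte]
        rw [ih]
        simp only [pvDedupFrom, hc, hd, Bool.false_eq_true, reduceIte, List.filter_cons_of_pos,
          List.map_cons]
        simp
      · have hd' : PySem.Set.contains dups x = false := by simpa using hd
        simp only [hc, hd', Bool.false_eq_true, reduceIte]
        rw [ih]
        simp only [pvDedupFrom, hc, Bool.false_eq_true, reduceIte]
        rw [List.filter_cons_of_neg (by simpa [PySem.Set.contains] using hd')]

-- In a ≤-sorted list, a character has an equal adjacent neighbour iff it occurs at least twice.
theorem pv_adj_mem (c : Char) : ∀ s : List Char, s.Pairwise (· ≤ ·) →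
    (c ∈ ((s.zip s.tail).filter (fun p => p.1 == p.2)).map Prod.fst ↔ 2 ≤ s.count c) := by
  intro s
  induction s with
  | nil => simp
  | cons a t ih =>
    intro hp
    have hp' := (List.pairwise_cons.mp hp).2
    have hhead := (List.pairwise_cons.mp hp).1
    cases t with
    | nil => simp [List.count_cons]; split <;> omega
    | cons b t' =>
      have hab : a ≤ b := hhead b (by simp)
      have hmem := ih hp'
      simp only [List.tail_cons, List.zip_cons_cons, List.filter_cons] at hmem ⊢
      by_cases hca : c = a
      · by_cases hab' : a = b
        · subst hca; subst hab'
          simp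
        · subst hca
          have hlt : c < b := lt_of_le_of_ne hab hab'
          have hnot : c ∉ b :: t' := by
            intro hmem'
            rcases List.mem_cons.mp hmem' with h1 | h2
            · exact hab' h1
            · exact absurd ((List.pairwise_cons.mp hp').1 _ h2) (not_le.mpr hlt)
          have hcnt0 : (b :: t').count c = 0 := List.count_eq_zero.mpr hnot
          have hne : (c == b) = false := by simp [hab']
          constructor
          · intro hin
            have h2 : 2 ≤ (b :: t').count c := hmem.mp (by simpa [hne] using hin)
            omega
          · intro hcnt
            exfalso
            simp [hcnt0] at hcnt
      · have hstep : (a :: b :: t').count c = (b :: t').count c := by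
          simp [List.count_cons]
          exact fun h => hca h.symm
        by_cases hab' : (a == b) = true
        · simp only [hab', reduceIte, List.map_cons, List.mem_cons, hstep]
          rw [← hmem]
          simp [hca]
        · have hab'' : (a == b) = false := by simpa using hab'
          simp only [hab'', Bool.false_eq_true, reduceIte, hstep]
          exact hmem

-- ===== VERDICT (by name: the statement is the Claim_ definition above) =====
theorem get_multiple_letters_spec : Claim_equal_get_multiple_letters := by
  intro text _
  unfold Spec_get_multiple_letters get_multiple_letters_alt
  rw [pv_A_closed]
  simp only [PySem.List.slice_from_one]
  rw [pv_loop_closed, pv_dedupFrom_empty]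
  simp only [List.nil_append]
  congr 1
  apply List.filter_congr
  intro c hc
  have hs : (PySem.List.sorted text.toList (fun x => x) false).Pairwise (· ≤ ·) := by
    simpa using PySem.List.sorted_pairwise text.toList (fun x => x)
  have hperm : (PySem.List.sorted text.toList (fun x => x) false).Perm text.toList :=
    PySem.List.sorted_perm text.toList (fun x => x) false
  have hcount : (PySem.List.sorted text.toList (fun x => x) false).count c = text.toList.count c :=
    hperm.count_eq c
  have hadj := pv_adj_mem c _ hs
  rw [hcount] at hadj
  simp [PySem.Set.contains, PySem.Set.mem_ofList, hadj]
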